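-- pv_equiv track=rewrite | github.com/MrBrantCode/unitest_baseline | mut_generate/mist_train_taco/taco_3726/solution.py | count_ways_to_connect_vertices
-- ===== SOURCE A (Python) =====
-- def count_ways_to_connect_vertices(n, edge):
--     mod = 10 ** 9 + 7
--     dp_f = [[-1] * n for _ in range(n)]
--     dp_g = [[-1] * n for _ in range(n)]
--
--     for i in range(n):
--         dp_f[i][i] = dp_g[i][i] = 1
--
--     for i in range(n - 1):
--         dp_f[i][i + 1] = dp_g[i][i + 1] = 1 if edge[i][i + 1] else 0
--
--     def f(l, r):
--         if dp_f[l][r] != -1: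
--             return dp_f[l][r]
--         dp_f[l][r] = g(l, r) if edge[l][r] else 0
--         for m in range(l + 1, r):
--             if edge[l][m]:
--                 dp_f[l][r] = (dp_f[l][r] + g(l, m) * f(m, r)) % mod
--         return dp_f[l][r]
--
--     def g(l, r):
--         if dp_g[l][r] != -1:
--             return dp_g[l][r]
--         dp_g[l][r] = f(l + 1, r)
--         for m in range(l + 1, r):
--             dp_g[l][r] = (dp_g[l][r] + f(l, m) * f(m + 1, r)) % mod
--         return dp_g[l][r]
--
--     return f(0, n - 1)
-- ===== SOURCE B (Python) =====
-- def count_ways_to_connect_vertices(n, edge):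
--     mod = 10 ** 9 + 7
--     f = {}
--     g = {}
--     for i in range(n):
--         f[(i, i)] = g[(i, i)] = 1
--     for i in range(n - 1):
--         f[(i, i + 1)] = g[(i, i + 1)] = 1 if edge[i][i + 1] else 0
--     for length in range(2, n):
--         for l in range(n - length):
--             r = l + length
--             gv = f[(l + 1, r)]
--             for m in range(l + 1, r):
--                 gv = (gv + f[(l, m)] * f[(m + 1, r)]) % mod
--             g[(l, r)] = gv
--             fv = gv if edge[l][r] else 0
--             for m in range(l + 1, r):
--                 if edge[l][m]:
--                     fv = (fv + g[(l, m)] * f[(m, r)]) % mod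
--             f[(l, r)] = fv
--     return f[(0, n - 1)]
-- ===== Notes on version B (the rewrite author's own statement) =====
-- stated objective: alternative
-- what changed: Replaced the mutually recursive memoized top-down f/g with an iterative bottom-up interval DP that fills dictionary tables by increasing interval length (g before f per cell), reading only already-filled cells.
-- outside the precondition, e.g. on count_ways_to_connect_vertices(4, [[0, 0, 0, 0], [1, 1, 1], [1, 1, 1, 1], [1, 1, 1, 1]]): A returns 0, B raises IndexError
import Mathlib
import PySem

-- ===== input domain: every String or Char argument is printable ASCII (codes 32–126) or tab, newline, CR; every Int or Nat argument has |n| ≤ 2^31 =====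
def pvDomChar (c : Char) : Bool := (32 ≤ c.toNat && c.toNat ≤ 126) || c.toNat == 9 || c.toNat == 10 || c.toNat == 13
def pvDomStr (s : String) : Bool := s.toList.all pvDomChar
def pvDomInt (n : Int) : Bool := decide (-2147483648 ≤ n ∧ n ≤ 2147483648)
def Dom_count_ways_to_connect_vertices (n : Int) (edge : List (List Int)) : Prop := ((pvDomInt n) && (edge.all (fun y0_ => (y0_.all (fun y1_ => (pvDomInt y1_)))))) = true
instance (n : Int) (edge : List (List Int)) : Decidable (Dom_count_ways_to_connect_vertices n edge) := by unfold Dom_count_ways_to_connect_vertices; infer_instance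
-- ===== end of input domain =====

-- B replaces A's mutually recursive memoized top-down f/g with an iterative bottom-up
-- interval DP over dictionary tables filled by increasing interval length (objective:
-- alternative decomposition, same asymptotic cost).

-- ===== PORT A =====
-- edge[l][r] truth test (exact under Pre_, where every access is in range)
def pvEdge (edge : List (List Int)) (l r : Int) : Bool :=
  PySem.List.pyGetD (PySem.List.pyGetD edge l []) r 0 != 0

-- A's f/g, step for step. A's dp tables only memoize (value-transparent): the preset
-- cells are exactly the r = l and r = l + 1 branches below; the fuel argument only
-- makes the mutual recursion total in Lean and is ample on every admitted input.
mutual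
def pvF : Nat → List (List Int) → Int → Int → Int
  | 0, _, _, _ => 0
  | (fuel+1), edge, l, r =>
    if r = l then 1
    else if r = l + 1 then (if pvEdge edge l r then 1 else 0)
    else
      (PySem.List.pyRange (l+1) r 1).foldl
        (fun acc m => if pvEdge edge l m then (acc + pvG fuel edge l m * pvF fuel edge m r) % 1000000007 else acc)
        (if pvEdge edge l r then pvG fuel edge l r else 0)
def pvG : Nat → List (List Int) → Int → Int → Int
  | 0, _, _, _ => 0
  | (fuel+1), edge, l, r =>
    if r = l then 1
    else if r = l + 1 then (if pvEdge edge l r then 1 else 0)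
    else
      (PySem.List.pyRange (l+1) r 1).foldl
        (fun acc m => (acc + pvF fuel edge l m * pvF fuel edge (m+1) r) % 1000000007)
        (pvF fuel edge (l+1) r)
end

def count_ways_to_connect_vertices (n : Int) (edge : List (List Int)) : Int :=
  pvF (2 * n.toNat + 4) edge 0 (n - 1)

-- ===== PORT B =====
-- bottom-up tables f, g keyed by (l, r); dict reads use getD (the default never fires
-- under Pre_, where Python's f[...] / g[...] lookups always hit)
def count_ways_to_connect_vertices_alt (n : Int) (edge : List (List Int)) : Int :=
  let st0 : PySem.Dict (Int × Int) Int × PySem.Dict (Int × Int) Int :=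
    (PySem.List.pyRange 0 n 1).foldl
      (fun st i => (st.1.insert (i, i) 1, st.2.insert (i, i) 1))
      (PySem.Dict.empty, PySem.Dict.empty)
  let st1 :=
    (PySem.List.pyRange 0 (n-1) 1).foldl
      (fun st i =>
        let e : Int := if pvEdge edge i (i+1) then 1 else 0
        (st.1.insert (i, i+1) e, st.2.insert (i, i+1) e))
      st0
  let st2 :=
    (PySem.List.pyRange 2 n 1).foldl
      (fun st len =>
        (PySem.List.pyRange 0 (n-len) 1).foldl
          (fun st l =>
            let r := l + len
            let gv :=
              (PySem.List.pyRange (l+1) r 1).foldl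
                (fun acc m => (acc + st.1.getD (l, m) 0 * st.1.getD (m+1, r) 0) % 1000000007)
                (st.1.getD (l+1, r) 0)
            let st' := (st.1, st.2.insert (l, r) gv)
            let fv :=
              (PySem.List.pyRange (l+1) r 1).foldl
                (fun acc m => if pvEdge edge l m then (acc + st'.2.getD (l, m) 0 * st'.1.getD (m, r) 0) % 1000000007 else acc)
                (if pvEdge edge l r then gv else 0)
            (st'.1.insert (l, r) fv, st'.2))
          st)
      st1
  st2.1.getD (0, n-1) 0

-- ===== PRECONDITION & SPEC =====
-- Pre_ excludes n ≤ 0 and matrices whose rows 0..n-2 are shorter than n: there Python's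
-- dp_f[0][n-1] / f[(0,n-1)] or an edge[...] access can raise (IndexError/KeyError); on
-- some jagged matrices A's memoized recursion happens to skip the short row and still
-- returns, while which cells are probed is an artefact of the traversal (B reads them all).
def Pre_count_ways_to_connect_vertices (n : Int) (edge : List (List Int)) : Prop :=
  1 ≤ n ∧ n - 1 ≤ (edge.length : Int) ∧ ∀ row ∈ edge.take (n-1).toNat, n ≤ (row.length : Int)
instance (n : Int) (edge : List (List Int)) : Decidable (Pre_count_ways_to_connect_vertices n edge) := by
  unfold Pre_count_ways_to_connect_vertices; infer_instance

def pvWitness_count_ways_to_connect_vertices : Int × List (List Int) := (3, [[0, 1, 1], [0, 0, 1], [0, 0, 0]])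

def Spec_count_ways_to_connect_vertices (n : Int) (edge : List (List Int)) (out : Int) : Prop := out = count_ways_to_connect_vertices_alt n edge
instance (n : Int) (edge : List (List Int)) (out : Int) : Decidable (Spec_count_ways_to_connect_vertices n edge out) := by unfold Spec_count_ways_to_connect_vertices; infer_instance

-- ===== CLAIM (what is proved, stated in full; the proofs are below) =====
def Claim_equal_count_ways_to_connect_vertices : Prop := ∀ (n : Int) (edge : List (List Int)), Dom_count_ways_to_connect_vertices n edge → Pre_count_ways_to_connect_vertices n edge → Spec_count_ways_to_connect_vertices n edge (count_ways_to_connect_vertices n edge)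

-- ===== LEMMAS AND PROOFS =====

-- canonical-fuel values of A's f and g
def pvFc (edge : List (List Int)) (l r : Int) : Int := pvF (2*(r-l).toNat+2) edge l r
def pvGc (edge : List (List Int)) (l r : Int) : Int := pvG (2*(r-l).toNat+1) edge l r

lemma pvFc_base0 (edge : List (List Int)) (l r : Int) (h : r = l) : pvFc edge l r = 1 := by
  subst h; simp [pvFc, pvF]
lemma pvGc_base0 (edge : List (List Int)) (l r : Int) (h : r = l) : pvGc edge l r = 1 := by
  subst h; simp [pvGc, pvG]
lemma pvFc_base1 (edge : List (List Int)) (l r : Int) (h : r = l + 1) :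
    pvFc edge l r = (if pvEdge edge l r then 1 else 0) := by
  subst h
  simp [pvFc, pvF]
lemma pvGc_base1 (edge : List (List Int)) (l r : Int) (h : r = l + 1) :
    pvGc edge l r = (if pvEdge edge l r then 1 else 0) := by
  subst h
  simp [pvGc, pvG]

-- any sufficient fuel computes the canonical value
lemma pv_fuel (edge : List (List Int)) : ∀ k : Nat,
    (∀ l r : Int, l ≤ r → 2*(r-l).toNat+2 = k → ∀ fuel, k ≤ fuel → pvF fuel edge l r = pvFc edge l r)
    ∧ (∀ l r : Int, l ≤ r → 2*(r-l).toNat+1 = k → ∀ fuel, k ≤ fuel → pvG fuel edge l r = pvGc edge l r) := by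
  intro k
  induction k using Nat.strong_induction_on with
  | _ k ih =>
    constructor
    · intro l r hlr hk fuel hfuel
      subst hk
      obtain ⟨fl, rfl⟩ : ∃ fl, fuel = fl + 1 := ⟨fuel - 1, by omega⟩
      by_cases h0 : r = l
      · rw [pvFc_base0 edge l r h0]; simp [pvF, h0]
      by_cases h1 : r = l + 1
      · rw [pvFc_base1 edge l r h1]; simp [pvF, h1]
      have hlr2 : l + 2 ≤ r := by omega
      have unfoldF : ∀ f', pvF (f'+1) edge l r = (PySem.List.pyRange (l+1) r 1).foldl
          (fun acc m => if pvEdge edge l m then (acc + pvG f' edge l m * pvF f' edge m r) % 1000000007 else acc)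
          (if pvEdge edge l r then pvG f' edge l r else 0) := by
        intro f'; simp [pvF, h0, h1]
      have hc : pvFc edge l r = pvF (2*(r-l).toNat+1+1) edge l r := by
        rw [pvFc]
      rw [hc, unfoldF fl, unfoldF (2*(r-l).toNat+1)]
      have hGlr : ∀ f', 2*(r-l).toNat+1 ≤ f' → pvG f' edge l r = pvGc edge l r :=
        fun f' hf => (ih (2*(r-l).toNat+1) (by omega)).2 l r hlr rfl f' hf
      rw [hGlr fl (by omega), hGlr (2*(r-l).toNat+1) (by omega)]
      apply PySem.List.foldl_congr_mem
      intro acc m hm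
      obtain ⟨hm1, hm2⟩ := (PySem.List.mem_pyRange_one).1 hm
      have hG : ∀ f', 2*(m-l).toNat+1 ≤ f' → pvG f' edge l m = pvGc edge l m :=
        fun f' hf => (ih (2*(m-l).toNat+1) (by omega)).2 l m (by omega) rfl f' hf
      have hF : ∀ f', 2*(r-m).toNat+2 ≤ f' → pvF f' edge m r = pvFc edge m r :=
        fun f' hf => (ih (2*(r-m).toNat+2) (by omega)).1 m r (by omega) rfl f' hf
      rw [hG fl (by omega), hG (2*(r-l).toNat+1) (by omega),
          hF fl (by omega), hF (2*(r-l).toNat+1) (by omega)]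
    · intro l r hlr hk fuel hfuel
      subst hk
      obtain ⟨fl, rfl⟩ : ∃ fl, fuel = fl + 1 := ⟨fuel - 1, by omega⟩
      by_cases h0 : r = l
      · rw [pvGc_base0 edge l r h0]; simp [pvG, h0]
      by_cases h1 : r = l + 1
      · rw [pvGc_base1 edge l r h1]; simp [pvG, h1]
      have hlr2 : l + 2 ≤ r := by omega
      have unfoldG : ∀ f', pvG (f'+1) edge l r = (PySem.List.pyRange (l+1) r 1).foldl
          (fun acc m => (acc + pvF f' edge l m * pvF f' edge (m+1) r) % 1000000007)
          (pvF f' edge (l+1) r) := by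
        intro f'; simp [pvG, h0, h1]
      have hc : pvGc edge l r = pvG (2*(r-l).toNat+1) edge l r := rfl
      have h2d : (2:Nat)*(r-l).toNat+1 = (2*(r-l).toNat)+1 := rfl
      rw [hc, h2d, unfoldG fl, unfoldG (2*(r-l).toNat)]
      have hFi : ∀ f', 2*(r-(l+1)).toNat+2 ≤ f' → pvF f' edge (l+1) r = pvFc edge (l+1) r :=
        fun f' hf => (ih (2*(r-(l+1)).toNat+2) (by omega)).1 (l+1) r (by omega) rfl f' hf
      rw [hFi fl (by omega), hFi (2*(r-l).toNat) (by omega)]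
      apply PySem.List.foldl_congr_mem
      intro acc m hm
      obtain ⟨hm1, hm2⟩ := (PySem.List.mem_pyRange_one).1 hm
      have hF1 : ∀ f', 2*(m-l).toNat+2 ≤ f' → pvF f' edge l m = pvFc edge l m :=
        fun f' hf => (ih (2*(m-l).toNat+2) (by omega)).1 l m (by omega) rfl f' hf
      have hF2 : ∀ f', 2*(r-(m+1)).toNat+2 ≤ f' → pvF f' edge (m+1) r = pvFc edge (m+1) r :=
        fun f' hf => (ih (2*(r-(m+1)).toNat+2) (by omega)).1 (m+1) r (by omega) rfl f' hf
      rw [hF1 fl (by omega), hF1 (2*(r-l).toNat) (by omega),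
          hF2 fl (by omega), hF2 (2*(r-l).toNat) (by omega)]

lemma pvGc_eq (edge : List (List Int)) (l r : Int) (h : l + 2 ≤ r) :
    pvGc edge l r = (PySem.List.pyRange (l+1) r 1).foldl
      (fun acc m => (acc + pvFc edge l m * pvFc edge (m+1) r) % 1000000007)
      (pvFc edge (l+1) r) := by
  have h0 : ¬ r = l := by omega
  have h1 : ¬ r = l + 1 := by omega
  have hF : ∀ l' r' f', l' ≤ r' → 2*(r'-l').toNat+2 ≤ f' → pvF f' edge l' r' = pvFc edge l' r' :=
    fun l' r' f' ha hb => (pv_fuel edge (2*(r'-l').toNat+2)).1 l' r' ha rfl f' hb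
  have unfoldG : ∀ f', pvG (f'+1) edge l r = (PySem.List.pyRange (l+1) r 1).foldl
      (fun acc m => (acc + pvF f' edge l m * pvF f' edge (m+1) r) % 1000000007)
      (pvF f' edge (l+1) r) := by
    intro f'; simp [pvG, h0, h1]
  have hc : pvGc edge l r = pvG ((2*(r-l).toNat)+1) edge l r := rfl
  rw [hc, unfoldG (2*(r-l).toNat)]
  rw [hF (l+1) r (2*(r-l).toNat) (by omega) (by omega)]
  apply PySem.List.foldl_congr_mem
  intro acc m hm
  obtain ⟨hm1, hm2⟩ := (PySem.List.mem_pyRange_one).1 hm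
  rw [hF l m (2*(r-l).toNat) (by omega) (by omega),
      hF (m+1) r (2*(r-l).toNat) (by omega) (by omega)]

lemma pvFc_eq (edge : List (List Int)) (l r : Int) (h : l + 2 ≤ r) :
    pvFc edge l r = (PySem.List.pyRange (l+1) r 1).foldl
      (fun acc m => if pvEdge edge l m then (acc + pvGc edge l m * pvFc edge m r) % 1000000007 else acc)
      (if pvEdge edge l r then pvGc edge l r else 0) := by
  have h0 : ¬ r = l := by omega
  have h1 : ¬ r = l + 1 := by omega
  have hF : ∀ l' r' f', l' ≤ r' → 2*(r'-l').toNat+2 ≤ f' → pvF f' edge l' r' = pvFc edge l' r' :=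
    fun l' r' f' ha hb => (pv_fuel edge (2*(r'-l').toNat+2)).1 l' r' ha rfl f' hb
  have hG : ∀ l' r' f', l' ≤ r' → 2*(r'-l').toNat+1 ≤ f' → pvG f' edge l' r' = pvGc edge l' r' :=
    fun l' r' f' ha hb => (pv_fuel edge (2*(r'-l').toNat+1)).2 l' r' ha rfl f' hb
  have unfoldF : ∀ f', pvF (f'+1) edge l r = (PySem.List.pyRange (l+1) r 1).foldl
      (fun acc m => if pvEdge edge l m then (acc + pvG f' edge l m * pvF f' edge m r) % 1000000007 else acc)
      (if pvEdge edge l r then pvG f' edge l r else 0) := by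
    intro f'; simp [pvF, h0, h1]
  have hc : pvFc edge l r = pvF ((2*(r-l).toNat+1)+1) edge l r := by rw [pvFc]
  rw [hc, unfoldF (2*(r-l).toNat+1)]
  rw [hG l r (2*(r-l).toNat+1) (by omega) (by omega)]
  apply PySem.List.foldl_congr_mem
  intro acc m hm
  obtain ⟨hm1, hm2⟩ := (PySem.List.mem_pyRange_one).1 hm
  rw [hG l m (2*(r-l).toNat+1) (by omega) (by omega),
      hF m r (2*(r-l).toNat+1) (by omega) (by omega)]

-- the bottom-up tables' invariant: every filled cell holds the canonical value
def pvInv (edge : List (List Int)) (n L cutoff : Int)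
    (st : PySem.Dict (Int × Int) Int × PySem.Dict (Int × Int) Int) : Prop :=
  ∀ l r : Int, 0 ≤ l → l ≤ r → r ≤ n - 1 → (r - l < L ∨ (r - l = L ∧ l < cutoff)) →
    st.1.getD (l, r) 0 = pvFc edge l r ∧ st.2.getD (l, r) 0 = pvGc edge l r

-- generic invariant rule for a foldl over range(a, b)
lemma pv_foldl_inv {α : Type} (P : Int → α → Prop) (f : α → Int → α) (a b : Int) (hab : a ≤ b)
    (step : ∀ i x, a ≤ i → i < b → P i x → P (i+1) (f x i)) :
    ∀ init, P a init → P b ((PySem.List.pyRange a b 1).foldl f init) := by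
  have main : ∀ k : Nat, ∀ a : Int, (b - a).toNat = k → a ≤ b →
      (∀ i x, a ≤ i → i < b → P i x → P (i+1) (f x i)) →
      ∀ init, P a init → P b ((PySem.List.pyRange a b 1).foldl f init) := by
    intro k
    induction k with
    | zero =>
      intro a hk hab' step' init h
      have hba : b = a := by omega
      rw [PySem.List.pyRange_one_eq_nil (by omega)]
      simpa [hba] using h
    | succ k ih =>
      intro a hk hab' step' init h
      have hlt : a < b := by omega
      rw [PySem.List.pyRange_one_cons hlt]
      simp only [List.foldl_cons]
      exact ih (a+1) (by omega) (by omega) (fun i x h1 h2 => step' i x (by omega) h2)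
        (f init a) (step' a init le_rfl hlt h)
  exact main (b-a).toNat a rfl hab step

lemma pvInv_mono (edge : List (List Int)) (n L c L' c' : Int)
    (st : PySem.Dict (Int × Int) Int × PySem.Dict (Int × Int) Int)
    (h : pvInv edge n L c st)
    (himp : ∀ l r : Int, 0 ≤ l → l ≤ r → r ≤ n - 1 →
      (r - l < L' ∨ (r - l = L' ∧ l < c')) → (r - l < L ∨ (r - l = L ∧ l < c))) :
    pvInv edge n L' c' st :=
  fun l r a b cc d => h l r a b cc (himp l r a b cc d)

-- diagonal base loop
lemma pv_base0_inv (edge : List (List Int)) (n : Int) (hn : 1 ≤ n) :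
    pvInv edge n 1 0 ((PySem.List.pyRange 0 n 1).foldl
      (fun st i => (st.1.insert (i, i) 1, st.2.insert (i, i) 1))
      (PySem.Dict.empty, PySem.Dict.empty)) := by
  have main := pv_foldl_inv (fun i st => pvInv edge n 0 i st)
    (fun st i => (st.1.insert (i, i) 1, st.2.insert (i, i) 1)) 0 n (by omega)
    (by
      intro i x hi hib hinv l r h0 hlr hrn hcond
      have hr : r = l := by omega
      refine ⟨?_, ?_⟩
      · show (x.1.insert (i, i) 1).getD (l, r) 0 = pvFc edge l r
        rw [PySem.Dict.getD_insert]
        by_cases hkey : ((l, r) : Int × Int) = (i, i)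
        · rw [if_pos hkey, pvFc_base0 edge l r hr]
        · have hne : ¬(l = i ∧ r = i) := by simpa [Prod.ext_iff] using hkey
          rw [if_neg hkey]
          exact (hinv l r h0 hlr hrn (by rcases em (l = i) with h | h <;> omega)).1
      · show (x.2.insert (i, i) 1).getD (l, r) 0 = pvGc edge l r
        rw [PySem.Dict.getD_insert]
        by_cases hkey : ((l, r) : Int × Int) = (i, i)
        · rw [if_pos hkey, pvGc_base0 edge l r hr]
        · have hne : ¬(l = i ∧ r = i) := by simpa [Prod.ext_iff] using hkey
          rw [if_neg hkey]
          exact (hinv l r h0 hlr hrn (by rcases em (l = i) with h | h <;> omega)).2)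
    (PySem.Dict.empty, PySem.Dict.empty)
    (by intro l r h0 hlr hrn hcond; exact absurd hcond (by omega))
  exact pvInv_mono edge n 0 n 1 0 _ main (by intro l r a b c d; omega)

-- length-1 base loop
lemma pv_base1_inv (edge : List (List Int)) (n : Int) (hn : 1 ≤ n)
    (st : PySem.Dict (Int × Int) Int × PySem.Dict (Int × Int) Int)
    (h : pvInv edge n 1 0 st) :
    pvInv edge n 2 0 ((PySem.List.pyRange 0 (n-1) 1).foldl
      (fun st i =>
        let e : Int := if pvEdge edge i (i+1) then 1 else 0
        (st.1.insert (i, i+1) e, st.2.insert (i, i+1) e))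
      st) := by
  have main := pv_foldl_inv (fun i st => pvInv edge n 1 i st)
    (fun st i =>
      let e : Int := if pvEdge edge i (i+1) then 1 else 0
      (st.1.insert (i, i+1) e, st.2.insert (i, i+1) e)) 0 (n-1) (by omega)
    (by
      intro i x hi hib hinv l r h0 hlr hrn hcond
      refine ⟨?_, ?_⟩
      · show (x.1.insert (i, i+1) (if pvEdge edge i (i+1) then 1 else 0)).getD (l, r) 0 = pvFc edge l r
        rw [PySem.Dict.getD_insert]
        by_cases hkey : ((l, r) : Int × Int) = (i, i+1)
        · obtain ⟨h1, h2⟩ : l = i ∧ r = i + 1 := by simpa [Prod.ext_iff] using hkey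
          subst h1; subst h2
          rw [if_pos rfl, pvFc_base1 edge l (l+1) rfl]
        · have hne : ¬(l = i ∧ r = i + 1) := by simpa [Prod.ext_iff] using hkey
          rw [if_neg hkey]
          exact (hinv l r h0 hlr hrn (by rcases em (l = i) with h | h <;> omega)).1
      · show (x.2.insert (i, i+1) (if pvEdge edge i (i+1) then 1 else 0)).getD (l, r) 0 = pvGc edge l r
        rw [PySem.Dict.getD_insert]
        by_cases hkey : ((l, r) : Int × Int) = (i, i+1)
        · obtain ⟨h1, h2⟩ : l = i ∧ r = i + 1 := by simpa [Prod.ext_iff] using hkey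
          subst h1; subst h2
          rw [if_pos rfl, pvGc_base1 edge l (l+1) rfl]
        · have hne : ¬(l = i ∧ r = i + 1) := by simpa [Prod.ext_iff] using hkey
          rw [if_neg hkey]
          exact (hinv l r h0 hlr hrn (by rcases em (l = i) with h | h <;> omega)).2)
    st h
  exact pvInv_mono edge n 1 (n-1) 2 0 _ main (by intro l r a b c d; omega)

-- one cell of the main loop: g first, then f, reading only already-filled cells
lemma pv_inner_step (edge : List (List Int)) (n len l : Int)
    (st : PySem.Dict (Int × Int) Int × PySem.Dict (Int × Int) Int)
    (h2 : 2 ≤ len) (hl : 0 ≤ l) (hlb : l < n - len)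
    (hinv : pvInv edge n len l st) :
    pvInv edge n len (l+1)
      (st.1.insert (l, l+len)
        ((PySem.List.pyRange (l+1) (l+len) 1).foldl
          (fun acc m => if pvEdge edge l m then
              (acc + (st.2.insert (l, l+len)
                ((PySem.List.pyRange (l+1) (l+len) 1).foldl
                  (fun acc m => (acc + st.1.getD (l, m) 0 * st.1.getD (m+1, l+len) 0) % 1000000007)
                  (st.1.getD (l+1, l+len) 0))).getD (l, m) 0 * st.1.getD (m, l+len) 0) % 1000000007
            else acc)
          (if pvEdge edge l (l+len) then
              (PySem.List.pyRange (l+1) (l+len) 1).foldl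
                (fun acc m => (acc + st.1.getD (l, m) 0 * st.1.getD (m+1, l+len) 0) % 1000000007)
                (st.1.getD (l+1, l+len) 0)
            else 0)),
       st.2.insert (l, l+len)
        ((PySem.List.pyRange (l+1) (l+len) 1).foldl
          (fun acc m => (acc + st.1.getD (l, m) 0 * st.1.getD (m+1, l+len) 0) % 1000000007)
          (st.1.getD (l+1, l+len) 0))) := by
  have hgv : (PySem.List.pyRange (l+1) (l+len) 1).foldl
      (fun acc m => (acc + st.1.getD (l, m) 0 * st.1.getD (m+1, l+len) 0) % 1000000007)
      (st.1.getD (l+1, l+len) 0) = pvGc edge l (l+len) := by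
    rw [pvGc_eq edge l (l+len) (by omega),
        (hinv (l+1) (l+len) (by omega) (by omega) (by omega) (Or.inl (by omega))).1]
    apply PySem.List.foldl_congr_mem
    intro acc m hm
    obtain ⟨hm1, hm2⟩ := (PySem.List.mem_pyRange_one).1 hm
    rw [(hinv l m (by omega) (by omega) (by omega) (Or.inl (by omega))).1,
        (hinv (m+1) (l+len) (by omega) (by omega) (by omega) (Or.inl (by omega))).1]
  rw [hgv]
  have hfv : (PySem.List.pyRange (l+1) (l+len) 1).foldl
      (fun acc m => if pvEdge edge l m then
          (acc + (st.2.insert (l, l+len) (pvGc edge l (l+len))).getD (l, m) 0 * st.1.getD (m, l+len) 0) % 1000000007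
        else acc)
      (if pvEdge edge l (l+len) then pvGc edge l (l+len) else 0) = pvFc edge l (l+len) := by
    rw [pvFc_eq edge l (l+len) (by omega)]
    apply PySem.List.foldl_congr_mem
    intro acc m hm
    obtain ⟨hm1, hm2⟩ := (PySem.List.mem_pyRange_one).1 hm
    rw [PySem.Dict.getD_insert,
        if_neg (show ¬(((l, m) : Int × Int) = (l, l+len)) by
          simp only [Prod.mk.injEq, not_and]; intro _; omega),
        (hinv l m (by omega) (by omega) (by omega) (Or.inl (by omega))).2,
        (hinv m (l+len) (by omega) (by omega) (by omega) (Or.inl (by omega))).1]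
  rw [hfv]
  intro l' r' h0 hlr hrn hcond
  refine ⟨?_, ?_⟩
  · show (st.1.insert (l, l+len) (pvFc edge l (l+len))).getD (l', r') 0 = pvFc edge l' r'
    rw [PySem.Dict.getD_insert]
    by_cases hkey : ((l', r') : Int × Int) = (l, l+len)
    · obtain ⟨h1, h2⟩ : l' = l ∧ r' = l + len := by simpa [Prod.ext_iff] using hkey
      subst h1; subst h2
      rw [if_pos rfl]
    · have hne : ¬(l' = l ∧ r' = l + len) := by simpa [Prod.ext_iff] using hkey
      rw [if_neg hkey]
      exact (hinv l' r' h0 hlr hrn (by rcases em (l' = l) with h | h <;> omega)).1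
  · show (st.2.insert (l, l+len) (pvGc edge l (l+len))).getD (l', r') 0 = pvGc edge l' r'
    rw [PySem.Dict.getD_insert]
    by_cases hkey : ((l', r') : Int × Int) = (l, l+len)
    · obtain ⟨h1, h2⟩ : l' = l ∧ r' = l + len := by simpa [Prod.ext_iff] using hkey
      subst h1; subst h2
      rw [if_pos rfl]
    · have hne : ¬(l' = l ∧ r' = l + len) := by simpa [Prod.ext_iff] using hkey
      rw [if_neg hkey]
      exact (hinv l' r' h0 hlr hrn (by rcases em (l' = l) with h | h <;> omega)).2

-- the whole bottom-up filling
lemma pv_outer_inv (edge : List (List Int)) (n : Int) (h2 : 2 ≤ n)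
    (st : PySem.Dict (Int × Int) Int × PySem.Dict (Int × Int) Int)
    (h : pvInv edge n 2 0 st) :
    pvInv edge n n 0 ((PySem.List.pyRange 2 n 1).foldl
      (fun st len =>
        (PySem.List.pyRange 0 (n-len) 1).foldl
          (fun st l =>
            let r := l + len
            let gv :=
              (PySem.List.pyRange (l+1) r 1).foldl
                (fun acc m => (acc + st.1.getD (l, m) 0 * st.1.getD (m+1, r) 0) % 1000000007)
                (st.1.getD (l+1, r) 0)
            let st' := (st.1, st.2.insert (l, r) gv)
            let fv :=
              (PySem.List.pyRange (l+1) r 1).foldl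
                (fun acc m => if pvEdge edge l m then (acc + st'.2.getD (l, m) 0 * st'.1.getD (m, r) 0) % 1000000007 else acc)
                (if pvEdge edge l r then gv else 0)
            (st'.1.insert (l, r) fv, st'.2))
          st)
      st) := by
  have main := pv_foldl_inv (fun len st => pvInv edge n len 0 st)
    (fun st len =>
      (PySem.List.pyRange 0 (n-len) 1).foldl
        (fun st l =>
          let r := l + len
          let gv :=
            (PySem.List.pyRange (l+1) r 1).foldl
              (fun acc m => (acc + st.1.getD (l, m) 0 * st.1.getD (m+1, r) 0) % 1000000007)
              (st.1.getD (l+1, r) 0)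
          let st' := (st.1, st.2.insert (l, r) gv)
          let fv :=
            (PySem.List.pyRange (l+1) r 1).foldl
              (fun acc m => if pvEdge edge l m then (acc + st'.2.getD (l, m) 0 * st'.1.getD (m, r) 0) % 1000000007 else acc)
              (if pvEdge edge l r then gv else 0)
          (st'.1.insert (l, r) fv, st'.2))
        st) 2 n h2
    (by
      intro len x h2len hlen hinv
      have inner := pv_foldl_inv (fun l st => pvInv edge n len l st)
        (fun st l =>
          let r := l + len
          let gv :=
            (PySem.List.pyRange (l+1) r 1).foldl
              (fun acc m => (acc + st.1.getD (l, m) 0 * st.1.getD (m+1, r) 0) % 1000000007)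
              (st.1.getD (l+1, r) 0)
          let st' := (st.1, st.2.insert (l, r) gv)
          let fv :=
            (PySem.List.pyRange (l+1) r 1).foldl
              (fun acc m => if pvEdge edge l m then (acc + st'.2.getD (l, m) 0 * st'.1.getD (m, r) 0) % 1000000007 else acc)
              (if pvEdge edge l r then gv else 0)
          (st'.1.insert (l, r) fv, st'.2)) 0 (n - len) (by omega)
        (by
          intro l y hl hlb hinvy
          exact pv_inner_step edge n len l y h2len hl hlb hinvy)
        x hinv
      exact pvInv_mono edge n len (n-len) (len+1) 0 _ inner (by intro l r a b c d; omega))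
    st h
  exact main

-- ===== VERDICT (by name: the statement is the Claim_ definition above) =====
theorem count_ways_to_connect_vertices_spec : Claim_equal_count_ways_to_connect_vertices := by
  intro n edge _hdom hpre
  obtain ⟨hn, -⟩ := hpre
  have hA : count_ways_to_connect_vertices n edge = pvFc edge 0 (n-1) :=
    (pv_fuel edge (2*((n-1)-(0:Int)).toNat+2)).1 0 (n-1) (by omega) rfl (2*n.toNat+4) (by omega)
  have hB : count_ways_to_connect_vertices_alt n edge = pvFc edge 0 (n-1) := by
    by_cases h2 : 2 ≤ n
    · have base0 := pv_base0_inv edge n (by omega)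
      have base1 := pv_base1_inv edge n (by omega) _ base0
      have final := pv_outer_inv edge n h2 _ base1
      exact (final 0 (n-1) (by omega) (by omega) (by omega) (Or.inl (by omega))).1
    · have hn1 : n = 1 := by omega
      subst hn1
      have h00 : pvFc edge 0 (1-1) = 1 := pvFc_base0 edge 0 (1-1) (by omega)
      rw [h00]
      show (PySem.Dict.empty.insert ((0:Int), (0:Int)) (1:Int)).getD (0, 1-1) 0 = 1
      rw [show ((1:Int)-1) = 0 from rfl, PySem.Dict.getD_insert_self]
  show count_ways_to_connect_vertices n edge = count_ways_to_connect_vertices_alt n edge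
  rw [hA, hB]
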